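-- pv_equiv track=rewrite | github.com/crlshs/beecrowd-submissions | 3fase bora/tempCodeRunnerFile.py | minimo_balanceamento
-- ===== SOURCE A (Python) =====
-- def minimo_balanceamento(N, K, bonecas):
--     bonecas.sort()
--
--     balanceamentos = []
--
--     for i in range(N - 2):
--         A = bonecas[i]
--         B = bonecas[i + 1]
--         balanceamento = (A - B) ** 2
--         balanceamentos.append((balanceamento, i))
--
--     balanceamentos.sort()
--
--     usados = [False] * N
--     soma_balanceamentos = 0
--     trios_formados = 0
--
--     for balanceamento, i in balanceamentos:
--         if not usados[i] and not usados[i + 1] and not usados[i + 2]: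
--             soma_balanceamentos += balanceamento
--             trios_formados += 1
--             usados[i] = usados[i + 1] = usados[i + 2] = True
--             if trios_formados == K:
--                 break
--
--     return soma_balanceamentos
-- ===== SOURCE B (Python) =====
-- def minimo_balanceamento(N, K, bonecas):
--     bonecas.sort()
--     usados = [False] * N
--     soma_balanceamentos = 0
--     trios_formados = 0
--     while True:
--         best_bal = best_i = None
--         for i in range(N - 2):
--             if usados[i] or usados[i + 1] or usados[i + 2]:
--                 continue
--             bal = (bonecas[i] - bonecas[i + 1]) ** 2
--             if best_bal is None or bal < best_bal:
--                 best_bal, best_i = bal, i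
--         if best_bal is None:
--             break
--         soma_balanceamentos += best_bal
--         trios_formados += 1
--         usados[best_i] = usados[best_i + 1] = usados[best_i + 2] = True
--         if trios_formados == K:
--             break
--     return soma_balanceamentos
-- ===== Notes on version B (the rewrite author's own statement) =====
-- stated objective: alternative
-- what changed: B never builds or sorts the list of (balance, index) pairs: after sorting the dolls it repeatedly scans the pair indices once per trio, selecting the currently cheapest pair whose three indices are all unused (ties broken by the lower index, matching the tuple-sort order), until K trios are formed or none remains.
import Mathlib
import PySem

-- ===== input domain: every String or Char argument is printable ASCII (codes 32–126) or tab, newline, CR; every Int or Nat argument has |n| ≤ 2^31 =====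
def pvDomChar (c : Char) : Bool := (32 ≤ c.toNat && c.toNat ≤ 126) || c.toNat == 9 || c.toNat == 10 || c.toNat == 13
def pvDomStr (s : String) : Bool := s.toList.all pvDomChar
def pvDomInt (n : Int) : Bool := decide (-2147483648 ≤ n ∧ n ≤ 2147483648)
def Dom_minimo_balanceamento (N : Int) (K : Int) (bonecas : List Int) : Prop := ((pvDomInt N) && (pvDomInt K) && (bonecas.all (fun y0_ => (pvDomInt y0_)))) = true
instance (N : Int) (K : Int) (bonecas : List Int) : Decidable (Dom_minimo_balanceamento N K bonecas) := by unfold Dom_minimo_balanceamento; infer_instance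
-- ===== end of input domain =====

-- B replaces A's pair-list + second sort by repeated selection of the cheapest currently
-- available adjacent pair (alternative algorithm, not claimed faster). Both Pythons sort
-- `bonecas` in place; the equivalence proved is about the return value (the mutation is identical).

-- ===== PORT A =====
-- the triple assignment usados[i] = usados[i+1] = usados[i+2] = True (identical line in A and B)
def pvMark (u : List Bool) (i : Int) : List Bool :=
  PySem.List.pySetD (PySem.List.pySetD (PySem.List.pySetD u i true) (i + 1) true) (i + 2) true

-- A's first for-loop: balanceamentos = [((bonecas[i]-bonecas[i+1])**2, i) for i in range(N-2)]
def pvPairsA (bs : List Int) (N : Int) : List (Int × Int) :=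
  (PySem.List.pyRange 0 (N - 2) 1).map (fun i =>
    ((PySem.List.pyGetD bs i 0 - PySem.List.pyGetD bs (i + 1) 0) ^ 2, i))

-- A's second for-loop over the sorted pair list, with its break
def pvALoop (K : Int) : List (Int × Int) → List Bool → Int → Int → Int
  | [], _, soma, _ => soma
  | (bal, i) :: rest, usados, soma, trios =>
    if !(PySem.List.pyGetD usados i false) && !(PySem.List.pyGetD usados (i + 1) false)
        && !(PySem.List.pyGetD usados (i + 2) false) then
      let soma' := soma + bal
      let trios' := trios + 1
      let usados' := pvMark usados i
      if trios' == K then soma' else pvALoop K rest usados' soma' trios'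
    else pvALoop K rest usados soma trios

def minimo_balanceamento (N : Int) (K : Int) (bonecas : List Int) : Int :=
  let bs := PySem.List.sorted bonecas (fun x => x) false
  -- Python's tuple sort is lexicographic: sorting with key toLex is exact
  let bals := PySem.List.sorted (pvPairsA bs N) (fun p => (toLex p : Lex (Int × Int))) false
  pvALoop K bals (List.replicate N.toNat false) 0 0

-- ===== PORT B =====
-- one step of B's inner scan: skip used windows, keep the strictly smaller balance
def pvSelStep (bs : List Int) (usados : List Bool) (acc : Option (Int × Int)) (i : Int) :
    Option (Int × Int) :=
  if PySem.List.pyGetD usados i false || PySem.List.pyGetD usados (i + 1) false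
      || PySem.List.pyGetD usados (i + 2) false then acc
  else
    let bal := (PySem.List.pyGetD bs i 0 - PySem.List.pyGetD bs (i + 1) 0) ^ 2
    match acc with
    | none => some (bal, i)
    | some (b0, _) => if bal < b0 then some (bal, i) else acc

-- B's inner for-loop: best (balance, index) over i in range(N-2), none if no window is free
def pvBest (bs : List Int) (N : Int) (usados : List Bool) : Option (Int × Int) :=
  (PySem.List.pyRange 0 (N - 2) 1).foldl (pvSelStep bs usados) none

-- B's while-loop; each productive pass marks a fresh index, so (N-2).toNat + 1 passes suffice
def pvBLoop (bs : List Int) (N : Int) (K : Int) : Nat → List Bool → Int → Int → Int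
  | 0, _, soma, _ => soma
  | fuel + 1, usados, soma, trios =>
    match pvBest bs N usados with
    | none => soma
    | some (bal, i) =>
      let soma' := soma + bal
      let trios' := trios + 1
      let usados' := pvMark usados i
      if trios' == K then soma' else pvBLoop bs N K fuel usados' soma' trios'

def minimo_balanceamento_alt (N : Int) (K : Int) (bonecas : List Int) : Int :=
  let bs := PySem.List.sorted bonecas (fun x => x) false
  pvBLoop bs N K ((N - 2).toNat + 1) (List.replicate N.toNat false) 0 0

-- ===== PRECONDITION & SPEC =====
-- Pre_ excludes exactly the inputs where A raises IndexError: as soon as the pair loop runs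
-- (N ≥ 3) it reads bonecas[N-3] and bonecas[N-2], which requires N - 2 ≤ len(bonecas).
-- B raises on exactly the same inputs.
def Pre_minimo_balanceamento (N : Int) (K : Int) (bonecas : List Int) : Prop :=
  N ≤ bonecas.length + 1 ∨ N ≤ 2

instance (N : Int) (K : Int) (bonecas : List Int) : Decidable (Pre_minimo_balanceamento N K bonecas) := by
  unfold Pre_minimo_balanceamento; infer_instance

def pvWitness_minimo_balanceamento : Int × Int × List Int := (6, 1, [4, 1, 3, 9, 2, 2])

def Spec_minimo_balanceamento (N : Int) (K : Int) (bonecas : List Int) (out : Int) : Prop :=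
  out = minimo_balanceamento_alt N K bonecas
instance (N : Int) (K : Int) (bonecas : List Int) (out : Int) : Decidable (Spec_minimo_balanceamento N K bonecas out) := by
  unfold Spec_minimo_balanceamento; infer_instance

-- ===== CLAIM (what is proved, stated in full; the proofs are below) =====
def Claim_equal_minimo_balanceamento : Prop := ∀ (N : Int) (K : Int) (bonecas : List Int), Dom_minimo_balanceamento N K bonecas → Pre_minimo_balanceamento N K bonecas → Spec_minimo_balanceamento N K bonecas (minimo_balanceamento N K bonecas)

-- ===== LEMMAS AND PROOFS =====

-- the balance of the adjacent pair at index i of the sorted list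
def pvGap (bs : List Int) (i : Int) : Int :=
  (PySem.List.pyGetD bs i 0 - PySem.List.pyGetD bs (i + 1) 0) ^ 2

-- the window i, i+1, i+2 is entirely unused
def pvFree (u : List Bool) (i : Int) : Bool :=
  !(PySem.List.pyGetD u i false) && !(PySem.List.pyGetD u (i + 1) false)
    && !(PySem.List.pyGetD u (i + 2) false)

-- lexicographic order on (balance, index) pairs, Python's tuple order
def pvLexLe (p q : Int × Int) : Prop := p.1 < q.1 ∨ (p.1 = q.1 ∧ p.2 ≤ q.2)

theorem pvLexLe_refl (p : Int × Int) : pvLexLe p p := Or.inr ⟨rfl, le_refl _⟩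

theorem pvLexLe_trans {p q r : Int × Int} (h1 : pvLexLe p q) (h2 : pvLexLe q r) : pvLexLe p r := by
  unfold pvLexLe at *; omega

theorem pvLexLe_antisymm {p q : Int × Int} (h1 : pvLexLe p q) (h2 : pvLexLe q p) : p = q := by
  obtain ⟨a, b⟩ := p; obtain ⟨c, d⟩ := q
  simp only [pvLexLe] at h1 h2
  simp only [Prod.mk.injEq]
  omega

theorem pvPairsA_eq (bs : List Int) (N : Int) :
    pvPairsA bs N = (PySem.List.pyRange 0 (N - 2) 1).map (fun i => (pvGap bs i, i)) := rfl

theorem pvALoop_cons (K bal i : Int) (rest : List (Int × Int)) (u : List Bool) (soma trios : Int) :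
    pvALoop K ((bal, i) :: rest) u soma trios =
      if pvFree u i then
        (if (trios + 1) == K then soma + bal
         else pvALoop K rest (pvMark u i) (soma + bal) (trios + 1))
      else pvALoop K rest u soma trios := rfl

theorem pvBLoop_succ_none {bs : List Int} {N K : Int} {fuel : Nat} {u : List Bool} {soma trios : Int}
    (h : pvBest bs N u = none) :
    pvBLoop bs N K (fuel + 1) u soma trios = soma := by
  simp [pvBLoop, h]

theorem pvBLoop_succ_some {bs : List Int} {N K : Int} {fuel : Nat} {u : List Bool}
    {soma trios bal i : Int} (h : pvBest bs N u = some (bal, i)) :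
    pvBLoop bs N K (fuel + 1) u soma trios =
      if (trios + 1) == K then soma + bal
      else pvBLoop bs N K fuel (pvMark u i) (soma + bal) (trios + 1) := by
  simp [pvBLoop, h]

theorem pvSelStep_skip {bs : List Int} {u : List Bool} {acc : Option (Int × Int)} {i : Int}
    (h : pvFree u i = false) : pvSelStep bs u acc i = acc := by
  unfold pvSelStep
  cases ha : PySem.List.pyGetD u i false <;>
    cases hb : PySem.List.pyGetD u (i + 1) false <;>
      cases hc : PySem.List.pyGetD u (i + 2) false <;>
        simp_all [pvFree]

theorem pvSelStep_free {bs : List Int} {u : List Bool} {acc : Option (Int × Int)} {i : Int}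
    (h : pvFree u i = true) :
    pvSelStep bs u acc i =
      (match acc with
       | none => some (pvGap bs i, i)
       | some (b0, i0) => if pvGap bs i < b0 then some (pvGap bs i, i) else some (b0, i0)) := by
  unfold pvSelStep
  have ha : PySem.List.pyGetD u i false = false := by
    revert h; unfold pvFree; cases PySem.List.pyGetD u i false <;> simp
  have hb : PySem.List.pyGetD u (i + 1) false = false := by
    revert h; unfold pvFree; cases PySem.List.pyGetD u (i + 1) false <;> simp
  have hc : PySem.List.pyGetD u (i + 2) false = false := by
    revert h; unfold pvFree; cases PySem.List.pyGetD u (i + 2) false <;> simp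
  rcases acc with _ | ⟨b0, i0⟩ <;> simp [ha, hb, hc, pvGap]

-- setting an entry to true never turns a true read into a false one
theorem pvGetD_set_true (xs : List Bool) (n : Nat) (m : Int)
    (h : PySem.List.pyGetD xs m false = true) :
    PySem.List.pyGetD (xs.set n true) m false = true := by
  simp only [PySem.List.pyGetD, PySem.List.pyGet?, List.length_set] at h ⊢
  cases hk : PySem.List.pyIdx? xs.length m with
  | none => rw [hk] at h; simp at h
  | some k =>
    rw [hk] at h
    simp only [Option.bind_some] at h ⊢
    cases hx : xs[k]? with
    | none => rw [hx] at h; simp at h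
    | some b =>
      rw [hx] at h
      simp only [Option.getD_some] at h
      subst h
      have hklt : k < xs.length := (List.getElem?_eq_some_iff.mp hx).1
      rw [List.getElem?_set]
      by_cases hnk : n = k
      · simp [hnk, hklt]
      · simp [hnk, hx]

theorem pvMark_getD_true {u : List Bool} {i : Int} (h0 : 0 ≤ i) {m : Int}
    (h : PySem.List.pyGetD u m false = true) :
    PySem.List.pyGetD (pvMark u i) m false = true := by
  unfold pvMark
  rw [PySem.List.pySetD_of_nonneg _ _ h0, PySem.List.pySetD_of_nonneg _ _ (by omega : (0:Int) ≤ i + 1),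
    PySem.List.pySetD_of_nonneg _ _ (by omega : (0:Int) ≤ i + 2)]
  exact pvGetD_set_true _ _ _ (pvGetD_set_true _ _ _ (pvGetD_set_true _ _ _ h))

-- a window that is not free stays not free after marking
theorem pvFree_mono_false {u : List Bool} {i j : Int} (h0 : 0 ≤ i)
    (h : pvFree u j = false) : pvFree (pvMark u i) j = false := by
  by_cases ha : PySem.List.pyGetD u j false = true
  · simp [pvFree, pvMark_getD_true h0 ha]
  by_cases hb : PySem.List.pyGetD u (j + 1) false = true
  · simp [pvFree, pvMark_getD_true h0 hb]
  by_cases hc : PySem.List.pyGetD u (j + 2) false = true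
  · simp [pvFree, pvMark_getD_true h0 hc]
  · exfalso
    simp only [Bool.not_eq_true] at ha hb hc
    simp [pvFree, ha, hb, hc] at h

theorem pvGetD_set_self (u : List Bool) (i : Int) (h0 : 0 ≤ i) (hlt : i.toNat < u.length) :
    PySem.List.pyGetD (u.set i.toNat true) i false = true := by
  have h1 : (0:Int) ≤ i := h0
  have h2 : i < (u.set i.toNat true).length := by
    simp only [List.length_set]; omega
  rw [PySem.List.pyGetD_eq_getElem _ _ h1 h2]
  have : (u.set i.toNat true)[i.toNat] = true := by
    rw [List.getElem_set_self]
  exact this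

-- the marked window itself becomes not free
theorem pvFree_mark_self {u : List Bool} {i : Int} (h0 : 0 ≤ i) (hlt : i.toNat < u.length) :
    pvFree (pvMark u i) i = false := by
  have h : PySem.List.pyGetD (pvMark u i) i false = true := by
    unfold pvMark
    rw [PySem.List.pySetD_of_nonneg _ _ h0, PySem.List.pySetD_of_nonneg _ _ (by omega : (0:Int) ≤ i + 1),
      PySem.List.pySetD_of_nonneg _ _ (by omega : (0:Int) ≤ i + 2)]
    exact pvGetD_set_true _ _ _ (pvGetD_set_true _ _ _ (pvGetD_set_self u i h0 hlt))
  simp [pvFree, h]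

-- specification of B's inner selection fold: it returns the lexicographically least
-- free (balance, index) pair, scanning indices in strictly increasing order
theorem pvFold_spec (bs : List Int) (u : List Bool) :
    ∀ (l : List Int) (acc : Option (Int × Int)),
    List.Pairwise (· < ·) l →
    (∀ b0 i0, acc = some (b0, i0) → b0 = pvGap bs i0 ∧ pvFree u i0 = true ∧ ∀ j ∈ l, i0 < j) →
    (l.foldl (pvSelStep bs u) acc = none → acc = none ∧ ∀ j ∈ l, pvFree u j = false) ∧
    (∀ b i, l.foldl (pvSelStep bs u) acc = some (b, i) →
      b = pvGap bs i ∧ pvFree u i = true ∧ (acc = some (b, i) ∨ i ∈ l) ∧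
      (∀ b0 i0, acc = some (b0, i0) → pvLexLe (b, i) (b0, i0)) ∧
      (∀ j ∈ l, pvFree u j = true → pvLexLe (b, i) (pvGap bs j, j))) := by
  intro l
  induction l with
  | nil =>
    intro acc _ hacc
    constructor
    · intro h; exact ⟨h, by simp⟩
    · intro b i h
      simp only [List.foldl_nil] at h
      obtain ⟨hg, hf, _⟩ := hacc b i h
      exact ⟨hg, hf, Or.inl h, fun b0 i0 h0 => by rw [h0] at h; cases h; exact pvLexLe_refl _,
        by simp⟩
  | cons j l ih =>
    intro acc hpw hacc
    obtain ⟨hjlt, hpw'⟩ := List.pairwise_cons.mp hpw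
    simp only [List.foldl_cons]
    by_cases hf : pvFree u j = true
    · rw [pvSelStep_free hf]
      rcases hacc' : acc with _ | ⟨b0, i0⟩
      · -- acc = none, acc' = some (gap j, j)
        subst hacc'
        have hstep : (∀ b0 i0, (some (pvGap bs j, j) : Option (Int × Int)) = some (b0, i0) →
            b0 = pvGap bs i0 ∧ pvFree u i0 = true ∧ ∀ x ∈ l, i0 < x) := by
          intro b0 i0 h; cases h; exact ⟨rfl, hf, hjlt⟩
        obtain ⟨hnone, hsome⟩ := ih (some (pvGap bs j, j)) hpw' hstep
        constructor
        · intro h; exact absurd (hnone h).1 (by simp)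
        · intro b i h
          obtain ⟨hg, hfi, hmem, hmin, hminl⟩ := hsome b i h
          refine ⟨hg, hfi, ?_, by simp, ?_⟩
          · rcases hmem with h' | h'
            · injection h' with h''
              have e : j = i := congrArg Prod.snd h''
              exact Or.inr (by rw [← e]; exact List.mem_cons_self)
            · exact Or.inr (List.mem_cons_of_mem _ h')
          · intro x hx hfx
            rcases List.mem_cons.mp hx with rfl | hx'
            · rcases hmem with h' | h'
              · injection h' with h''; rw [← h'']; exact pvLexLe_refl _
              · exact hmin _ _ rfl
            · exact hminl _ hx' hfx
      · -- acc = some (b0, i0)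
        subst hacc'
        obtain ⟨hg0, hf0, hlt0⟩ := hacc b0 i0 rfl
        have hi0j : i0 < j := hlt0 j (List.mem_cons_self)
        have hlt0' : ∀ x ∈ l, i0 < x := fun x hx => hlt0 x (List.mem_cons_of_mem _ hx)
        by_cases hcmp : pvGap bs j < b0
        · simp only [if_pos hcmp]
          have hstep : (∀ b1 i1, (some (pvGap bs j, j) : Option (Int × Int)) = some (b1, i1) →
              b1 = pvGap bs i1 ∧ pvFree u i1 = true ∧ ∀ x ∈ l, i1 < x) := by
            intro b1 i1 h; cases h; exact ⟨rfl, hf, hjlt⟩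
          obtain ⟨hnone, hsome⟩ := ih (some (pvGap bs j, j)) hpw' hstep
          constructor
          · intro h; exact absurd (hnone h).1 (by simp)
          · intro b i h
            obtain ⟨hg, hfi, hmem, hmin, hminl⟩ := hsome b i h
            have hacc_le : pvLexLe (b, i) (pvGap bs j, j) := by
              rcases hmem with h' | h'
              · injection h' with h''; rw [← h'']; exact pvLexLe_refl _
              · exact hmin _ _ rfl
            refine ⟨hg, hfi, ?_, ?_, ?_⟩
            · rcases hmem with h' | h'
              · injection h' with h''
                have e : j = i := congrArg Prod.snd h''
                exact Or.inr (by rw [← e]; exact List.mem_cons_self)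
              · exact Or.inr (List.mem_cons_of_mem _ h')
            · intro b1 i1 h1
              injection h1 with h1'; cases h1'
              exact pvLexLe_trans hacc_le (Or.inl hcmp)
            · intro x hx hfx
              rcases List.mem_cons.mp hx with rfl | hx'
              · exact hacc_le
              · exact hminl _ hx' hfx
        · simp only [if_neg hcmp]
          have hstep : (∀ b1 i1, (some (b0, i0) : Option (Int × Int)) = some (b1, i1) →
              b1 = pvGap bs i1 ∧ pvFree u i1 = true ∧ ∀ x ∈ l, i1 < x) := by
            intro b1 i1 h; cases h; exact ⟨hg0, hf0, hlt0'⟩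
          obtain ⟨hnone, hsome⟩ := ih (some (b0, i0)) hpw' hstep
          constructor
          · intro h; exact absurd (hnone h).1 (by simp)
          · intro b i h
            obtain ⟨hg, hfi, hmem, hmin, hminl⟩ := hsome b i h
            have hacc_le : pvLexLe (b, i) (b0, i0) := by
              rcases hmem with h' | h'
              · injection h' with h''; rw [← h'']; exact pvLexLe_refl _
              · exact hmin _ _ rfl
            refine ⟨hg, hfi, ?_, ?_, ?_⟩
            · rcases hmem with h' | h'
              · exact Or.inl h'
              · exact Or.inr (List.mem_cons_of_mem _ h')
            · intro b1 i1 h1; injection h1 with h1'; cases h1'; exact hacc_le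
            · intro x hx hfx
              rcases List.mem_cons.mp hx with rfl | hx'
              · exact pvLexLe_trans hacc_le (by unfold pvLexLe; omega)
              · exact hminl _ hx' hfx
    · have hf' : pvFree u j = false := by revert hf; cases pvFree u j <;> simp
      rw [pvSelStep_skip hf']
      have hacc' : (∀ b0 i0, acc = some (b0, i0) →
          b0 = pvGap bs i0 ∧ pvFree u i0 = true ∧ ∀ x ∈ l, i0 < x) := by
        intro b0 i0 h
        obtain ⟨h1, h2, h3⟩ := hacc b0 i0 h
        exact ⟨h1, h2, fun x hx => h3 x (List.mem_cons_of_mem _ hx)⟩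
      obtain ⟨hnone, hsome⟩ := ih acc hpw' hacc'
      constructor
      · intro h
        obtain ⟨h1, h2⟩ := hnone h
        refine ⟨h1, ?_⟩
        intro x hx
        rcases List.mem_cons.mp hx with rfl | hx'
        · exact hf'
        · exact h2 x hx'
      · intro b i h
        obtain ⟨hg, hfi, hmem, hmin, hminl⟩ := hsome b i h
        refine ⟨hg, hfi, ?_, hmin, ?_⟩
        · rcases hmem with h' | h'
          · exact Or.inl h'
          · exact Or.inr (List.mem_cons_of_mem _ h')
        · intro x hx hfx
          rcases List.mem_cons.mp hx with rfl | hx'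
          · exact absurd hfx (by simp [hf'])
          · exact hminl _ hx' hfx

-- ===== main loop equivalence =====
theorem pvLoop_eq (bs : List Int) (N K : Int) :
    ∀ (suf pre : List (Int × Int)) (u : List Bool) (soma trios : Int) (fuel : Nat),
    PySem.List.sorted (pvPairsA bs N) (fun p => (toLex p : Lex (Int × Int))) false = pre ++ suf →
    (∀ p ∈ pre, pvFree u p.2 = false) →
    u.length = N.toNat →
    suf.length < fuel →
    pvALoop K suf u soma trios = pvBLoop bs N K fuel u soma trios := by
  intro suf
  induction suf with
  | nil =>
    intro pre u soma trios fuel hL hpre hu hfl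
    obtain ⟨f, rfl⟩ : ∃ f, fuel = f + 1 := ⟨fuel - 1, by omega⟩
    have hbest : pvBest bs N u = none := by
      cases hb : pvBest bs N u with
      | none => rfl
      | some t =>
        obtain ⟨b, i⟩ := t
        exfalso
        have hb' : (PySem.List.pyRange 0 (N - 2) 1).foldl (pvSelStep bs u) none = some (b, i) := hb
        obtain ⟨hg, hfi, hmem, -, -⟩ :=
          (pvFold_spec bs u (PySem.List.pyRange 0 (N - 2) 1) none
            (PySem.List.pairwise_lt_pyRange_one 0 (N - 2)) (by intro b0 i0 h; simp at h)).2 b i hb'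
        rcases hmem with h' | hir
        · simp at h'
        · have hmemP : (pvGap bs i, i) ∈ pvPairsA bs N := by
            rw [pvPairsA_eq]; exact List.mem_map_of_mem hir
          have hin : (pvGap bs i, i) ∈ pre ++ ([] : List (Int × Int)) := by
            rw [← hL]; exact (PySem.List.mem_sorted _ _ _ _).mpr hmemP
          simp only [List.append_nil] at hin
          have hfalse := hpre _ hin
          simp only at hfalse
          rw [hfalse] at hfi; cases hfi
    rw [pvBLoop_succ_none hbest]
    rfl
  | cons p rest ih =>
    intro pre u soma trios fuel hL hpre hu hfl
    obtain ⟨bal, i⟩ := p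
    have hmemL : (bal, i) ∈ pre ++ (bal, i) :: rest :=
      List.mem_append_right _ List.mem_cons_self
    have hmemP : (bal, i) ∈ pvPairsA bs N := by
      rw [← PySem.List.mem_sorted (pvPairsA bs N) (fun p => (toLex p : Lex (Int × Int))) false, hL]
      exact hmemL
    obtain ⟨i', hi'r, hi'eq⟩ := List.mem_map.mp (by rw [pvPairsA_eq] at hmemP; exact hmemP)
    have hii : i' = i := congrArg Prod.snd hi'eq
    subst hii
    have hbal : pvGap bs i' = bal := congrArg Prod.fst hi'eq
    have hibounds : 0 ≤ i' ∧ i' < N - 2 := PySem.List.mem_pyRange_one.mp hi'r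
    have hPw : (pre ++ (bal, i') :: rest).Pairwise pvLexLe := by
      rw [← hL]
      exact (PySem.List.sorted_pairwise (pvPairsA bs N)
        (fun p => (toLex p : Lex (Int × Int)))).imp
        (fun {a b} h => Prod.Lex.toLex_le_toLex.mp h)
    have hrest_ge : ∀ q ∈ rest, pvLexLe (bal, i') q :=
      (List.pairwise_cons.mp (List.pairwise_append.mp hPw).2.1).1
    rw [pvALoop_cons]
    by_cases hf : pvFree u i' = true
    · rw [if_pos hf]
      obtain ⟨f, rfl⟩ : ∃ f, fuel = f + 1 := ⟨fuel - 1, by omega⟩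
      have hbest : pvBest bs N u = some (bal, i') := by
        cases hb : pvBest bs N u with
        | none =>
          exfalso
          have hb' : (PySem.List.pyRange 0 (N - 2) 1).foldl (pvSelStep bs u) none = none := hb
          have hallf := ((pvFold_spec bs u (PySem.List.pyRange 0 (N - 2) 1) none
            (PySem.List.pairwise_lt_pyRange_one 0 (N - 2)) (by intro b0 i0 h; simp at h)).1 hb').2
          have := hallf i' hi'r
          rw [this] at hf; cases hf
        | some t =>
          obtain ⟨b', i''⟩ := t
          have hb' : (PySem.List.pyRange 0 (N - 2) 1).foldl (pvSelStep bs u) none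
              = some (b', i'') := hb
          obtain ⟨hg', hf', hmem', -, hminl⟩ :=
            (pvFold_spec bs u (PySem.List.pyRange 0 (N - 2) 1) none
              (PySem.List.pairwise_lt_pyRange_one 0 (N - 2)) (by intro b0 i0 h; simp at h)).2
              b' i'' hb'
          have hi''r : i'' ∈ PySem.List.pyRange 0 (N - 2) 1 := by
            rcases hmem' with h' | h'
            · simp at h'
            · exact h'
          have h1 : pvLexLe (b', i'') (bal, i') := by
            have h := hminl i' hi'r hf
            rw [hbal] at h; exact h
          have hmemP' : (pvGap bs i'', i'') ∈ pvPairsA bs N := by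
            rw [pvPairsA_eq]; exact List.mem_map_of_mem hi''r
          have hmemL' : (pvGap bs i'', i'') ∈ pre ++ (bal, i') :: rest := by
            rw [← hL]; exact (PySem.List.mem_sorted _ _ _ _).mpr hmemP'
          have h2 : pvLexLe (bal, i') (b', i'') := by
            rcases List.mem_append.mp hmemL' with hp | hp
            · exfalso
              have hzz := hpre _ hp
              simp only at hzz
              rw [hzz] at hf'; cases hf'
            · rcases List.mem_cons.mp hp with he | hp'
              · have e1 : pvGap bs i'' = bal := congrArg Prod.fst he
                have e2 : i'' = i' := congrArg Prod.snd he
                rw [hg', e1, e2]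
                exact pvLexLe_refl _
              · have h := hrest_ge _ hp'
                rw [hg']
                exact h
          have heq := pvLexLe_antisymm h1 h2
          rw [heq]
      rw [pvBLoop_succ_some hbest]
      by_cases hK : ((trios + 1 : Int) == K) = true
      · rw [if_pos hK, if_pos hK]
      · rw [if_neg hK, if_neg hK]
        apply ih (pre ++ [(bal, i')]) (pvMark u i') (soma + bal) (trios + 1) f
        · rw [List.append_assoc, List.singleton_append]
          exact hL
        · intro q hq
          rcases List.mem_append.mp hq with hq' | hq'
          · exact pvFree_mono_false hibounds.1 (hpre q hq')
          · simp only [List.mem_singleton] at hq'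
            subst hq'
            exact pvFree_mark_self hibounds.1 (by rw [hu]; omega)
        · show (pvMark u i').length = N.toNat
          simp [pvMark, PySem.List.length_pySetD, hu]
        · simp only [List.length_cons] at hfl
          omega
    · rw [if_neg hf]
      apply ih (pre ++ [(bal, i')]) u soma trios fuel
      · rw [List.append_assoc, List.singleton_append]
        exact hL
      · intro q hq
        rcases List.mem_append.mp hq with hq' | hq'
        · exact hpre q hq'
        · simp only [List.mem_singleton] at hq'
          subst hq'
          show pvFree u i' = false
          revert hf; cases pvFree u i' <;> simp
      · exact hu
      · simp only [List.length_cons] at hfl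
        omega

-- ===== VERDICT (by name: the statement is the Claim_ definition above) =====
theorem minimo_balanceamento_spec : Claim_equal_minimo_balanceamento := by
  intro N K bonecas _ _
  unfold Spec_minimo_balanceamento
  have h := pvLoop_eq (PySem.List.sorted bonecas (fun x => x) false) N K
    (PySem.List.sorted (pvPairsA (PySem.List.sorted bonecas (fun x => x) false) N)
      (fun p => (toLex p : Lex (Int × Int))) false)
    [] (List.replicate N.toNat false) 0 0 ((N - 2).toNat + 1)
    (List.nil_append _).symm
    (by intro p hp; simp at hp)
    (by simp)
    (by
      rw [PySem.List.length_sorted, pvPairsA_eq, List.length_map,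
        PySem.List.length_pyRange_one]
      omega)
  exact h
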